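-- pv_equiv track=rewrite | github.com/duns-scotus/mlpy | tests/ml_integration/ml_debug/algorithms/search.py | find_first_greater
-- ===== SOURCE A (Python) =====
-- def find_first_greater(list, threshold):
--     i = 0
--     len = 0
--     for item in list:
--         len = (len + 1)
--     while (i < len):
--         if (list[i] > threshold):
--             return i
--         i = (i + 1)
--     return -1
-- ===== SOURCE B (Python) =====
-- def find_first_greater(list, threshold):
--     # Scan the list BACKWARDS, remembering the most recent (i.e. smallest) index
--     # whose element exceeds the threshold; the last hit of the reverse scan is
--     # the first index of the forward order.
--     ans = -1
--     for i in range(len(list) - 1, -1, -1):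
--         if list[i] > threshold:
--             ans = i
--     return ans
-- ===== Notes on version B (the rewrite author's own statement) =====
-- stated objective: alternative
-- what changed: B replaces A's two-stage forward procedure (a loop counting the length, then an index-based while loop with early return at the first hit) by a single backwards scan with an accumulator: it walks indices from the end, overwriting the answer at every element above the threshold, so the last overwrite is the first qualifying index and no early return is needed.
import Mathlib
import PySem

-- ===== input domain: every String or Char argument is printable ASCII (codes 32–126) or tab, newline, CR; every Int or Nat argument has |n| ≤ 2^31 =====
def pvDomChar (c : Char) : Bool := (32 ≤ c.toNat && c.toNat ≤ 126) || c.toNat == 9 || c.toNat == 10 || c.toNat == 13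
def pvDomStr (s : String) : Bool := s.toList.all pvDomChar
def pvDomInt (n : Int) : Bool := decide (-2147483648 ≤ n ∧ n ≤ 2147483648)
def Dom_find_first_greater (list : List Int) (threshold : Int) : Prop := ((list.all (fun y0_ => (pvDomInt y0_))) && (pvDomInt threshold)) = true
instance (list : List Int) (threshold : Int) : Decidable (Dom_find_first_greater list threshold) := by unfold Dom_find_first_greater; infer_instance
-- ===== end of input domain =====

-- B replaces A's count-then-while forward search by a single backwards scan that keeps the last hit; objective: alternative.


-- ===== PORT A =====
-- the 'while (i < len)' loop of A; decreases on (len - i).toNat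
def find_first_greater_while (list : List Int) (threshold : Int) (len i : Int) : Int :=
  if h : i < len then
    if ((PySem.List.pyGet? list i).getD 0) > threshold then i
    else find_first_greater_while list threshold len (i + 1)
  else -1
termination_by (len - i).toNat
decreasing_by omega

def find_first_greater (list : List Int) (threshold : Int) : Int :=
  -- for item in list: len = len + 1
  let len : Int := list.foldl (fun l _ => l + 1) 0
  find_first_greater_while list threshold len 0

-- ===== PORT B =====
-- backwards scan: for i in range(len(list)-1, -1, -1): overwrite ans at every hit
def find_first_greater_alt (list : List Int) (threshold : Int) : Int :=
  (PySem.List.pyRange ((list.length : Int) - 1) (-1) (-1)).foldl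
    (fun ans i => if ((PySem.List.pyGet? list i).getD 0) > threshold then i else ans) (-1)

-- ===== PRECONDITION & SPEC =====
def Spec_find_first_greater (list : List Int) (threshold : Int) (out : Int) : Prop := out = find_first_greater_alt list threshold
instance (list : List Int) (threshold : Int) (out : Int) : Decidable (Spec_find_first_greater list threshold out) := by unfold Spec_find_first_greater; infer_instance

-- ===== CLAIM (what is proved, stated in full; the proofs are below) =====
def Claim_equal_find_first_greater : Prop := ∀ (list : List Int) (threshold : Int), Dom_find_first_greater list threshold → Spec_find_first_greater list threshold (find_first_greater list threshold)

-- ===== LEMMAS AND PROOFS =====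
theorem foldl_count_len (list : List Int) (a : Int) :
    list.foldl (fun l _ => l + 1) a = a + list.length := by
  induction list generalizing a with
  | nil => simp
  | cons x xs ih => simp [List.foldl, ih]; omega

-- A's early-return while loop computes the foldr (first hit wins) over range(i, len)
theorem while_eq_foldr (list : List Int) (threshold : Int) (len : Int) :
    ∀ (n : Nat) (i : Int), (len - i).toNat = n →
    find_first_greater_while list threshold len i
      = (PySem.List.pyRange i len 1).foldr
          (fun j ans => if ((PySem.List.pyGet? list j).getD 0) > threshold then j else ans) (-1) := by
  intro n
  induction n with
  | zero =>
    intro i hn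
    have h : ¬ i < len := by omega
    rw [find_first_greater_while, dif_neg h, PySem.List.pyRange_one_eq_nil (by omega), List.foldr_nil]
  | succ n ih =>
    intro i hn
    by_cases h : i < len
    · rw [find_first_greater_while, dif_pos h, PySem.List.pyRange_one_cons h, List.foldr_cons]
      by_cases hx : ((PySem.List.pyGet? list i).getD 0) > threshold
      · rw [if_pos hx, if_pos hx]
      · rw [if_neg hx, if_neg hx, ih (i + 1) (by omega)]
    · rw [find_first_greater_while, dif_neg h, PySem.List.pyRange_one_eq_nil (by omega), List.foldr_nil]

theorem find_first_greater_spec : Claim_equal_find_first_greater := by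
  intro list threshold _
  unfold Spec_find_first_greater find_first_greater find_first_greater_alt
  simp only [foldl_count_len]
  rw [PySem.List.pyRange_neg_one_eq_reverse, List.foldl_reverse]
  have h : (-1 : Int) + 1 = 0 := by norm_num
  rw [h]
  have h2 : ((list.length : Int) - 1) + 1 = (list.length : Int) := by ring
  rw [h2, while_eq_foldr list threshold _ _ 0 rfl]
  norm_num
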